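-- pv_equiv track=rewrite | github.com/mvccc/zanmei | hymns/hymn_md.py | lyrics_to_md
-- ===== SOURCE A (Python) =====
-- def _format_lyric_line(line: str) -> str:
--     if not line.strip():
--         return ""
--     if line.endswith("  "):
--         return line
--     return f"{line.rstrip()}  "
--
-- def lyrics_to_md(hymn_title: str, slides: list[tuple[str, list[str]]]) -> str:
--     lines = [f"# {hymn_title}", ""]
--
--     for verse_marker, lyrics in slides:
--         if verse_marker:
--             lines.append(f"## {verse_marker}")
--         else:
--             lines.append("##")
--         lines.extend(_format_lyric_line(lyric) for lyric in lyrics)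
--         lines.append("")
--
--     return "\n".join(lines).rstrip() + "\n"
-- ===== SOURCE B (Python) =====
-- def _format_lyric_line(line: str) -> str:
--     if not line.strip():
--         return ""
--     if line.endswith("  "):
--         return line
--     return f"{line.rstrip()}  "
--
--
-- def lyrics_to_md(hymn_title: str, slides: list[tuple[str, list[str]]]) -> str:
--     # Build the document back-to-front: acc holds the trimmed document lines in
--     # reverse order; while it is empty we are still in the trailing-whitespace
--     # zone, so lines are rstripped and dropped if nothing remains. No global
--     # rstrip, no separator sentinel lines.
--     acc = []
--
--     def add(line):
--         if acc:
--             acc.append(line)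
--         else:
--             t = line.rstrip()
--             if t:
--                 acc.append(t)
--
--     for verse_marker, lyrics in reversed(slides):
--         add("")
--         for lyric in reversed(lyrics):
--             add(_format_lyric_line(lyric))
--         add("## " + verse_marker if verse_marker else "##")
--     add("")
--     add("# " + hymn_title)
--     return "\n".join(reversed(acc)) + "\n"
-- ===== Notes on version B (the rewrite author's own statement) =====
-- stated objective: alternative
-- what changed: B builds the document back-to-front over reversed(slides), keeping the trimmed lines in reverse order in a single accumulator whose invariant is 'the already-trimmed suffix', so trailing whitespace is dropped structurally instead of A's forward line list with sentinel separator lines + join + global rstrip.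
import Mathlib
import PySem

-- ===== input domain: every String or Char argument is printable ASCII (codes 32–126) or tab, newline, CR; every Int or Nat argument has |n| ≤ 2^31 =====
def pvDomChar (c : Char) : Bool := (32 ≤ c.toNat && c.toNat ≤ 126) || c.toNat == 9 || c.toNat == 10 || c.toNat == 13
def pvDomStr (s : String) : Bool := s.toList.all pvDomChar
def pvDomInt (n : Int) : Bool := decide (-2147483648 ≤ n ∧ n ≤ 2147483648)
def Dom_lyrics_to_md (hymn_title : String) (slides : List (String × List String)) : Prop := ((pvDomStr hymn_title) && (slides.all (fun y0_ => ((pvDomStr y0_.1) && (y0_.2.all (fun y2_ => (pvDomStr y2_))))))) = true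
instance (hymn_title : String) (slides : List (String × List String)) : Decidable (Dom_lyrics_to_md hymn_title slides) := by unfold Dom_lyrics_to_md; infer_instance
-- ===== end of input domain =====

-- B builds the document back-to-front, keeping the trimmed lines in reverse order and
-- dropping trailing whitespace structurally, replacing A's forward line list with
-- sentinel separator lines + join + global rstrip (objective: alternative decomposition).

-- ===== PORT A =====
def pvFmtLineA (line : String) : String :=
  if PySem.Str.strip line = "" then ""
  else if PySem.Str.endswith line "  " = true then line
  else PySem.Str.rstrip line ++ "  "

def lyrics_to_md (hymn_title : String) (slides : List (String × List String)) : String :=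
  let lines : List String :=
    slides.foldl (fun lines vl =>
        let lines := if vl.1 ≠ "" then lines ++ ["## " ++ vl.1] else lines ++ ["##"]
        let lines := lines ++ vl.2.map pvFmtLineA
        lines ++ [""])
      ["# " ++ hymn_title, ""]
  PySem.Str.rstrip (PySem.Str.join "\n" lines) ++ "\n"

-- ===== PORT B =====
def pvFmtLineB (line : String) : String :=
  if PySem.Str.strip line = "" then ""
  else if PySem.Str.endswith line "  " = true then line
  else PySem.Str.rstrip line ++ "  "

-- `add` from Source B: acc holds the trimmed document lines in reverse order;
-- while it is empty, incoming lines are rstripped and dropped if nothing remains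
def pvAdd (acc : List String) (line : String) : List String :=
  if acc ≠ [] then acc ++ [line]
  else if PySem.Str.rstrip line ≠ "" then acc ++ [PySem.Str.rstrip line] else acc

-- the Python loops run over `reversed(slides)` / `reversed(lyrics)` mutating `acc`,
-- which is exactly a right fold over the original lists
def lyrics_to_md_alt (hymn_title : String) (slides : List (String × List String)) : String :=
  let acc : List String :=
    slides.foldr (fun vl acc =>
        let acc := pvAdd acc ""
        let acc := vl.2.foldr (fun lyric acc => pvAdd acc (pvFmtLineB lyric)) acc
        pvAdd acc (if vl.1 ≠ "" then "## " ++ vl.1 else "##")) []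
  let acc := pvAdd acc ""
  let acc := pvAdd acc ("# " ++ hymn_title)
  PySem.Str.join "\n" acc.reverse ++ "\n"

-- ===== PRECONDITION & SPEC =====
def Spec_lyrics_to_md (hymn_title : String) (slides : List (String × List String)) (out : String) : Prop := out = lyrics_to_md_alt hymn_title slides
instance (hymn_title : String) (slides : List (String × List String)) (out : String) : Decidable (Spec_lyrics_to_md hymn_title slides out) := by unfold Spec_lyrics_to_md; infer_instance

-- ===== CLAIM (what is proved, stated in full; the proofs are below) =====
def Claim_equal_lyrics_to_md : Prop := ∀ (hymn_title : String) (slides : List (String × List String)), Dom_lyrics_to_md hymn_title slides → Spec_lyrics_to_md hymn_title slides (lyrics_to_md hymn_title slides)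

-- ===== LEMMAS AND PROOFS =====

-- the lines of one slide (header plus formatted lyrics), as A lists them
def pvSlideLines (vl : String × List String) : List String :=
  (if vl.1 ≠ "" then "## " ++ vl.1 else "##") :: vl.2.map pvFmtLineA

-- proof-side abstraction: the effect of one `add` on the newline-join of acc.reverse
def pvPrepend (line : String) (acc : String) : String :=
  if acc ≠ "" then line ++ "\n" ++ acc else PySem.Str.rstrip line

theorem pvFmt_eq : pvFmtLineB = pvFmtLineA := rfl

theorem pvLinesA_eq (slides : List (String × List String)) (init : List String) :
    slides.foldl (fun lines vl =>
        let lines := if vl.1 ≠ "" then lines ++ ["## " ++ vl.1] else lines ++ ["##"]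
        let lines := lines ++ vl.2.map pvFmtLineA
        lines ++ [""]) init
    = init ++ slides.flatMap (fun vl => pvSlideLines vl ++ [""]) := by
  induction slides generalizing init with
  | nil => simp
  | cons vl rest ih =>
    simp only [List.foldl_cons, List.flatMap_cons, ih, pvSlideLines]
    split <;> simp

-- rstrip of a concatenation: the suffix survives trimming, or disappears entirely
theorem pvRstrip_append_ne (x y : List Char) (h : PySem.Chars.rstrip y ≠ []) :
    PySem.Chars.rstrip (x ++ y) = x ++ PySem.Chars.rstrip y := by
  have hy : (List.dropWhile PySem.Chars.isspace y.reverse).isEmpty = false := by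
    simp only [PySem.Chars.rstrip, ne_eq, List.reverse_eq_nil_iff] at h
    simpa [List.isEmpty_iff] using h
  simp [PySem.Chars.rstrip, List.reverse_append, List.dropWhile_append, hy]

theorem pvRstrip_append_empty (x y : List Char) (h : PySem.Chars.rstrip y = []) :
    PySem.Chars.rstrip (x ++ y) = PySem.Chars.rstrip x := by
  have hy : (List.dropWhile PySem.Chars.isspace y.reverse).isEmpty = true := by
    simp only [PySem.Chars.rstrip, List.reverse_eq_nil_iff] at h
    simpa [List.isEmpty_iff] using h
  simp [PySem.Chars.rstrip, List.reverse_append, List.dropWhile_append, hy]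

theorem pvPrepend_toList (line acc : String) :
    (pvPrepend line acc).toList =
      if acc.toList ≠ [] then line.toList ++ '\n' :: acc.toList
      else PySem.Chars.rstrip line.toList := by
  by_cases h : acc = ""
  · subst h; simp [pvPrepend]
  · have : acc.toList ≠ [] := by
      intro hc; exact h (String.toList_inj.mp (by simpa using hc))
    simp [pvPrepend, h, this, String.toList_append]

-- folding `pvPrepend` from the right over a line list computes the
-- rstripped newline-join of those lines
theorem pvFoldr_prepend (ls : List String) :
    (ls.foldr pvPrepend "").toList
      = PySem.Chars.rstrip (PySem.Chars.join ['\n'] (ls.map String.toList)) := by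
  induction ls with
  | nil => simp [PySem.Chars.join_nil]; rfl
  | cons l ls ih =>
    rw [List.foldr_cons, pvPrepend_toList, ih]
    cases ls with
    | nil => simp [PySem.Chars.join_singleton, PySem.Chars.rstrip]
    | cons r rs =>
      simp only [List.map_cons]
      rw [PySem.Chars.join_cons_cons]
      by_cases h : PySem.Chars.rstrip (PySem.Chars.join ['\n'] (r.toList :: rs.map String.toList)) = []
      · rw [if_neg (by simp [h]), List.append_assoc,
          pvRstrip_append_empty _ _ (by rw [pvRstrip_append_empty _ _ h]; rfl)]
      · rw [if_pos (by simp [h]), pvRstrip_append_ne _ _ h]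
        simp

-- one `add` acts on the newline-join of acc.reverse exactly as `pvPrepend`
theorem pvAdd_join (acc : List String) (l : String)
    (hinv : acc ≠ [] → (PySem.Str.join "\n" acc.reverse).toList ≠ []) :
    (PySem.Str.join "\n" (pvAdd acc l).reverse).toList
      = (pvPrepend l (PySem.Str.join "\n" acc.reverse)).toList := by
  rw [pvPrepend_toList]
  cases acc with
  | nil =>
    simp only [pvAdd, ne_eq, not_true_eq_false, if_false, List.reverse_nil, List.nil_append]
    by_cases h : PySem.Str.rstrip l = ""
    · rw [if_neg (by simp [h])]
      simp [PySem.Str.join, PySem.Chars.join_nil]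
      have := congrArg String.toList h
      simpa using this.symm
    · rw [if_pos (by simp [h])]
      simp [PySem.Str.toList_join, PySem.Chars.join_singleton, PySem.Chars.join_nil]
  | cons a as =>
    have hne : (a :: as) ≠ ([] : List String) := by simp
    rw [if_pos (hinv hne)]
    have hadd : pvAdd (a :: as) l = (a :: as) ++ [l] := by simp [pvAdd]
    rw [hadd]
    obtain ⟨b, bs, hb⟩ := List.exists_cons_of_ne_nil (by simp : (a :: as).reverse ≠ [])
    rw [List.reverse_append, List.reverse_singleton, List.singleton_append, hb,
      PySem.Str.toList_join, PySem.Str.toList_join, List.map_cons, List.map_cons,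
      PySem.Chars.join_cons_cons]
    simp

-- the list accumulator of B computes, via its reverse join, the string
-- accumulator pvPrepend folds up — and it is never a join of only-empty lines
theorem pvFoldAdd (ls : List String) :
    (PySem.Str.join "\n" ((ls.foldr (fun l a => pvAdd a l) []).reverse)).toList
        = (ls.foldr pvPrepend "").toList
      ∧ ((ls.foldr (fun l a => pvAdd a l) []) ≠ [] →
         (PySem.Str.join "\n" ((ls.foldr (fun l a => pvAdd a l) []).reverse)).toList ≠ []) := by
  induction ls with
  | nil => exact ⟨by simp [PySem.Str.toList_join, PySem.Chars.join_nil], by simp⟩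
  | cons l ls ih =>
    obtain ⟨ih1, ih2⟩ := ih
    have h1 : (PySem.Str.join "\n" ((( l :: ls).foldr (fun l a => pvAdd a l) []).reverse)).toList
        = ((l :: ls).foldr pvPrepend "").toList := by
      rw [List.foldr_cons, pvAdd_join _ _ ih2, pvPrepend_toList, ih1, List.foldr_cons,
        pvPrepend_toList]
    refine ⟨h1, fun hne => ?_⟩
    rw [h1, List.foldr_cons, pvPrepend_toList]
    by_cases hc : ((ls.foldr pvPrepend "").toList : List Char) = []
    · rw [if_neg (by simp [hc])]
      -- acc for ls is empty (contrapositive of ih2), so pvAdd kept a nonempty rstrip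
      have hacc : ls.foldr (fun l a => pvAdd a l) [] = [] := by
        by_contra hja
        exact (ih2 hja) (by rw [ih1]; exact hc)
      rw [List.foldr_cons, hacc] at hne
      simp only [pvAdd, ne_eq, not_true_eq_false, if_false] at hne
      by_cases hr : PySem.Str.rstrip l = ""
      · simp [hr] at hne
      · intro hz
        exact hr (String.toList_inj.mp (by simpa [PySem.Str.toList_rstrip] using hz))
    · rw [if_pos (by simp [hc])]
      simp

-- B's structured right fold over slides is the right fold of `add`
-- over A's flat line list for those slides
theorem pvFoldrB_eq (slides : List (String × List String)) (acc0 : List String) :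
    slides.foldr (fun vl acc =>
        let acc := pvAdd acc ""
        let acc := vl.2.foldr (fun lyric acc => pvAdd acc (pvFmtLineB lyric)) acc
        pvAdd acc (if vl.1 ≠ "" then "## " ++ vl.1 else "##")) acc0
    = (slides.flatMap (fun vl => pvSlideLines vl ++ [""])).foldr (fun l a => pvAdd a l) acc0 := by
  induction slides with
  | nil => simp
  | cons vl rest ih =>
    rw [List.foldr_cons, ih, List.flatMap_cons, List.foldr_append, List.foldr_append]
    simp only [pvSlideLines, pvFmt_eq, List.foldr_cons, List.foldr_nil]
    rw [← List.foldr_map (f := pvFmtLineA) (g := fun l a => pvAdd a l)]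

-- ===== VERDICT (by name: the statement is the Claim_ definition above) =====
theorem lyrics_to_md_spec : Claim_equal_lyrics_to_md := by
  intro hymn_title slides _
  unfold Spec_lyrics_to_md lyrics_to_md lyrics_to_md_alt
  rw [pvLinesA_eq, pvFoldrB_eq]
  apply congrArg (· ++ "\n")
  apply String.toList_inj.mp
  have hlines : (["# " ++ hymn_title, ""] ++ slides.flatMap fun vl => pvSlideLines vl ++ [""])
      = ("# " ++ hymn_title) :: "" :: slides.flatMap (fun vl => pvSlideLines vl ++ [""]) := by simp
  rw [hlines, PySem.Str.toList_rstrip, PySem.Str.toList_join]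
  have hfold : pvAdd (pvAdd ((slides.flatMap (fun vl => pvSlideLines vl ++ [""])).foldr (fun l a => pvAdd a l) []) "") ("# " ++ hymn_title)
      = (("# " ++ hymn_title) :: "" :: slides.flatMap (fun vl => pvSlideLines vl ++ [""])).foldr (fun l a => pvAdd a l) [] := rfl
  rw [hfold, (pvFoldAdd _).1, pvFoldr_prepend]
  rfl
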